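-- pv_equiv track=rewrite | github.com/hussein-chakroun/sec-ai | physical_social_engineering/phishing_automation.py | _infer_department
-- ===== SOURCE A (Python) =====
-- def _infer_department(title: str) -> str:
--     """Infer department from job title"""
--     title_lower = title.lower()
--
--     if any(word in title_lower for word in ['engineer', 'developer', 'architect']):
--         return "Engineering"
--     elif any(word in title_lower for word in ['sales', 'account']):
--         return "Sales"
--     elif any(word in title_lower for word in ['marketing', 'content']):
--         return "Marketing"
--     elif 'hr' in title_lower or 'human' in title_lower:
--         return "Human Resources"
--     elif any(word in title_lower for word in ['finance', 'accounting']):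
--         return "Finance"
--     else:
--         return "Operations"
-- ===== SOURCE B (Python) =====
-- _KEYWORDS = [('engineer', 0), ('developer', 0), ('architect', 0),
--              ('sales', 1), ('account', 1),
--              ('marketing', 2), ('content', 2),
--              ('hr', 3), ('human', 3),
--              ('finance', 4), ('accounting', 4)]
-- _DEPTS = ['Engineering', 'Sales', 'Marketing', 'Human Resources', 'Finance', 'Operations']
--
--
-- def _infer_department(title: str) -> str:
--     """Single left-to-right scan of the title: at each position, lower the
--     best (= smallest) priority of any keyword starting there; index the
--     department list with the final minimum (5 = no match = Operations)."""
--     t = title.lower()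
--     best = 5
--     for i in range(len(t)):
--         for kw, p in _KEYWORDS:
--             if p < best and t.startswith(kw, i):
--                 best = p
--     return _DEPTS[best]
-- ===== Notes on version B (the rewrite author's own statement) =====
-- stated objective: alternative
-- what changed: Instead of A's keyword-by-keyword substring-search cascade where the first matching branch returns, B makes a single left-to-right pass over the title, checking at each position which keywords start there and keeping the minimum keyword priority in an accumulator, then indexes a department list with the final minimum.
import Mathlib
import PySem

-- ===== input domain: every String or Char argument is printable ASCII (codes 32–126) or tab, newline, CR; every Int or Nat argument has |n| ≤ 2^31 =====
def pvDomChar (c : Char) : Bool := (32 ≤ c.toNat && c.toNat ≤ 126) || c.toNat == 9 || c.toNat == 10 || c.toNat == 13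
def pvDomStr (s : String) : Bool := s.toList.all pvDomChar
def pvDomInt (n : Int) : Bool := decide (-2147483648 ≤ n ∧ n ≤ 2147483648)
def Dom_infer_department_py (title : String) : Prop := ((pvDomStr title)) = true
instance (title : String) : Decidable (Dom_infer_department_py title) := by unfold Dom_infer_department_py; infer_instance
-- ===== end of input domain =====

-- B replaces A's per-keyword substring-search cascade by a single left-to-right position scan
-- that keeps the minimum priority of any keyword starting at each position (objective: alternative).


-- ===== PORT A =====
-- literal transliteration of A's if/elif cascade
def infer_department_py (title : String) : String :=
  let title_lower := PySem.Str.lower title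
  if ["engineer", "developer", "architect"].any (fun word => PySem.Str.isIn word title_lower) then
    "Engineering"
  else if ["sales", "account"].any (fun word => PySem.Str.isIn word title_lower) then
    "Sales"
  else if ["marketing", "content"].any (fun word => PySem.Str.isIn word title_lower) then
    "Marketing"
  else if PySem.Str.isIn "hr" title_lower || PySem.Str.isIn "human" title_lower then
    "Human Resources"
  else if ["finance", "accounting"].any (fun word => PySem.Str.isIn word title_lower) then
    "Finance"
  else
    "Operations"

-- ===== PORT B =====
-- B: keyword → priority table, scanned once per title position with a min accumulator
def pvKeywords : List (List Char × Nat) :=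
  [ ("engineer".toList, 0), ("developer".toList, 0), ("architect".toList, 0),
    ("sales".toList, 1), ("account".toList, 1),
    ("marketing".toList, 2), ("content".toList, 2),
    ("hr".toList, 3), ("human".toList, 3),
    ("finance".toList, 4), ("accounting".toList, 4) ]

def pvDepts : List String :=
  ["Engineering", "Sales", "Marketing", "Human Resources", "Finance", "Operations"]

-- the inner 'for kw, p in _KEYWORDS' loop at one position (suffix s of the title)
def pvStep (s : List Char) (b : Nat) : Nat :=
  pvKeywords.foldl (fun acc kp => if kp.2 < acc && PySem.Chars.startswith s kp.1 then kp.2 else acc) b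

-- the outer 'for i in range(len(t))' loop: one call of pvStep per suffix position
def pvScan : List Char → Nat → Nat
  | [], b => b
  | c :: rest, b => pvScan rest (pvStep (c :: rest) b)

def infer_department_py_alt (title : String) : String :=
  let t := PySem.Str.lower title
  -- _DEPTS[best]: best is always in [0,5], so plain list indexing is exact here
  pvDepts.getD (pvScan t.toList 5) "Operations"

-- ===== PRECONDITION & SPEC =====
def Spec_infer_department_py (title : String) (out : String) : Prop := out = infer_department_py_alt title
instance (title : String) (out : String) : Decidable (Spec_infer_department_py title out) := by unfold Spec_infer_department_py; infer_instance

-- ===== CLAIM (what is proved, stated in full; the proofs are below) =====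
def Claim_equal_infer_department_py : Prop := ∀ (title : String), Dom_infer_department_py title → Spec_infer_department_py title (infer_department_py title)

-- ===== LEMMAS AND PROOFS =====

-- generic fold lemmas over an arbitrary keyword table
theorem pvAnd {a b : Bool} (h : (a && b) = true) : a = true ∧ b = true := by simpa using h

theorem pvFold_le (s : List Char) (tab : List (List Char × Nat)) (b : Nat) :
    tab.foldl (fun acc kp => if kp.2 < acc && PySem.Chars.startswith s kp.1 then kp.2 else acc) b ≤ b := by
  induction tab generalizing b with
  | nil => simp
  | cons kp rest ih =>
    simp only [List.foldl]
    by_cases h : (kp.2 < b && PySem.Chars.startswith s kp.1) = true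
    · simp only [h, if_true]
      have hlt : kp.2 < b := by simpa using (pvAnd h).1
      exact le_trans (ih _) (Nat.le_of_lt hlt)
    · simp only [h, if_false]
      exact ih b

theorem pvFold_cases (s : List Char) (tab : List (List Char × Nat)) (b : Nat) :
    tab.foldl (fun acc kp => if kp.2 < acc && PySem.Chars.startswith s kp.1 then kp.2 else acc) b = b ∨
      ∃ kp ∈ tab, PySem.Chars.startswith s kp.1 = true ∧
        tab.foldl (fun acc kp => if kp.2 < acc && PySem.Chars.startswith s kp.1 then kp.2 else acc) b = kp.2 := by
  induction tab generalizing b with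
  | nil => simp
  | cons kp rest ih =>
    simp only [List.foldl]
    by_cases h : (kp.2 < b && PySem.Chars.startswith s kp.1) = true
    · simp only [h, if_true]
      rcases ih kp.2 with h1 | ⟨kq, hmem, hsw, heq⟩
      · exact Or.inr ⟨kp, List.mem_cons_self, (pvAnd h).2, h1⟩
      · exact Or.inr ⟨kq, List.mem_cons_of_mem _ hmem, hsw, heq⟩
    · simp only [h, if_false]
      rcases ih b with h1 | ⟨kq, hmem, hsw, heq⟩
      · exact Or.inl h1
      · exact Or.inr ⟨kq, List.mem_cons_of_mem _ hmem, hsw, heq⟩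

theorem pvFold_le_of_match (s : List Char) (tab : List (List Char × Nat)) (b : Nat)
    (kp : List Char × Nat) (hmem : kp ∈ tab) (hsw : PySem.Chars.startswith s kp.1 = true) :
    tab.foldl (fun acc kq => if kq.2 < acc && PySem.Chars.startswith s kq.1 then kq.2 else acc) b ≤ kp.2 := by
  induction tab generalizing b with
  | nil => cases hmem
  | cons kq rest ih =>
    simp only [List.foldl]
    rcases List.mem_cons.mp hmem with rfl | hmem'
    · by_cases h : (kp.2 < b && PySem.Chars.startswith s kp.1) = true
      · simp only [h, if_true]; exact pvFold_le s rest kp.2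
      · simp only [h, if_false]
        have : ¬ kp.2 < b := by
          intro hlt; exact h (by simp [hlt, hsw])
        exact le_trans (pvFold_le s rest b) (by omega)
    · split
      · exact ih _ hmem'
      · exact ih _ hmem'

theorem pvStep_le (s : List Char) (b : Nat) : pvStep s b ≤ b := pvFold_le s pvKeywords b

theorem pvScan_le (s : List Char) (b : Nat) : pvScan s b ≤ b := by
  induction s generalizing b with
  | nil => simp [pvScan]
  | cons c rest ih => exact le_trans (ih _) (pvStep_le _ b)

theorem pvScan_cases (s : List Char) (b : Nat) :
    pvScan s b = b ∨ ∃ j kp, kp ∈ pvKeywords ∧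
      PySem.Chars.startswith (s.drop j) kp.1 = true ∧ pvScan s b = kp.2 := by
  induction s generalizing b with
  | nil => simp [pvScan]
  | cons c rest ih =>
    simp only [pvScan]
    rcases ih (pvStep (c :: rest) b) with h1 | ⟨j, kp, hmem, hsw, heq⟩
    · rw [h1]
      rcases pvFold_cases (c :: rest) pvKeywords b with h2 | ⟨kp, hmem, hsw, heq⟩
      · exact Or.inl h2
      · exact Or.inr ⟨0, kp, hmem, by simpa using hsw, heq⟩
    · exact Or.inr ⟨j + 1, kp, hmem, by simpa using hsw, heq⟩

theorem pvScan_le_of_match (s : List Char) (b : Nat) (j : Nat)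
    (kp : List Char × Nat) (hmem : kp ∈ pvKeywords)
    (hsw : PySem.Chars.startswith (s.drop j) kp.1 = true) (hne : kp.1 ≠ []) :
    pvScan s b ≤ kp.2 := by
  induction s generalizing b j with
  | nil =>
    exfalso
    have : kp.1 <+: ([] : List Char) := by
      simpa using (PySem.Chars.startswith_iff _ _).mp hsw
    exact hne (List.prefix_nil.mp this)
  | cons c rest ih =>
    simp only [pvScan]
    cases j with
    | zero =>
      exact le_trans (pvScan_le rest _)
        (pvFold_le_of_match (c :: rest) pvKeywords b kp hmem (by simpa using hsw))
    | succ j' => exact ih _ j' (by simpa using hsw)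

-- bridge: Python 'word in t' ↔ some suffix position startswith word
theorem pvOcc_iff (w : List Char) (t : List Char) :
    PySem.Chars.isIn w t = true ↔ ∃ j, PySem.Chars.startswith (t.drop j) w = true := by
  rw [← PySem.Chars.exists_prefix_drop_iff_isIn]
  constructor
  · rintro ⟨j, hj⟩; exact ⟨j, (PySem.Chars.startswith_iff _ _).mpr hj⟩
  · rintro ⟨j, hj⟩; exact ⟨j, (PySem.Chars.startswith_iff _ _).mp hj⟩

-- if keyword (w,p) is in the table and occurs in t, the scan result is ≤ p
theorem pvScan_le_of_occ (t : List Char) (w : List Char) (p : Nat)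
    (hmem : (w, p) ∈ pvKeywords) (hne : w ≠ [])
    (hocc : PySem.Chars.isIn w t = true) :
    pvScan t 5 ≤ p := by
  rcases (pvOcc_iff w t).mp hocc with ⟨j, hj⟩
  exact pvScan_le_of_match t 5 j (w, p) hmem hj hne

-- if the scan result is not 5, some table keyword of that priority occurs in t
theorem pvScan_occ (t : List Char) (h : pvScan t 5 ≠ 5) :
    ∃ kp ∈ pvKeywords, PySem.Chars.isIn kp.1 t = true ∧ pvScan t 5 = kp.2 := by
  rcases pvScan_cases t 5 with h1 | ⟨j, kp, hmem, hsw, heq⟩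
  · exact absurd h1 h
  · exact ⟨kp, hmem, (pvOcc_iff kp.1 t).mpr ⟨j, hsw⟩, heq⟩

theorem pvScan_ne (tl : List Char) (p : Nat) (hp : p ≠ 5)
    (h : ∀ kp ∈ pvKeywords, kp.2 = p → PySem.Chars.isIn kp.1 tl = false) :
    pvScan tl 5 ≠ p := by
  intro h0
  rcases pvScan_occ tl (by omega) with ⟨kp, hkp, hin, heq⟩
  rw [h0] at heq
  rw [h kp hkp heq.symm] at hin
  exact Bool.false_ne_true hin

-- ===== VERDICT (by name: the statement is the Claim_ definition above) =====
theorem infer_department_py_spec : Claim_equal_infer_department_py := by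
  intro title _
  unfold Spec_infer_department_py infer_department_py infer_department_py_alt
  set t := PySem.Str.lower title with ht
  set tl := t.toList with htl
  have hb : ∀ w : String, PySem.Str.isIn w t = PySem.Chars.isIn w.toList tl := by
    intro w; rw [PySem.Str.isIn_eq]
  simp only [List.any_cons, List.any_nil, Bool.or_false, hb, Bool.or_eq_true]
  have hle : pvScan tl 5 ≤ 5 := pvScan_le tl 5
  split_ifs with h1 h2 h3 h4 h5 <;>
    [skip;
     push_neg at h1;
     push_neg at h1 h2;
     push_neg at h1 h2 h3;
     push_neg at h1 h2 h3 h4;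
     push_neg at h1 h2 h3 h4 h5]
  · -- Engineering
    have hub : pvScan tl 5 ≤ 0 := by
      rcases h1 with h | h | h
      · exact pvScan_le_of_occ tl "engineer".toList 0 (by decide) (by decide) h
      · exact pvScan_le_of_occ tl "developer".toList 0 (by decide) (by decide) h
      · exact pvScan_le_of_occ tl "architect".toList 0 (by decide) (by decide) h
    have hv : pvScan tl 5 = 0 := by omega
    rw [← htl, hv]; rfl
  · -- Sales
    have n0 : pvScan tl 5 ≠ 0 := pvScan_ne tl 0 (by decide) (by
      intro kp hkp hkp2
      simp only [pvKeywords, List.mem_cons, List.not_mem_nil, or_false] at hkp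
      rcases hkp with rfl | rfl | rfl | rfl | rfl | rfl | rfl | rfl | rfl | rfl | rfl <;> simp_all)
    have hub : pvScan tl 5 ≤ 1 := by
      rcases h2 with h | h
      · exact pvScan_le_of_occ tl "sales".toList 1 (by decide) (by decide) h
      · exact pvScan_le_of_occ tl "account".toList 1 (by decide) (by decide) h
    have hv : pvScan tl 5 = 1 := by omega
    rw [← htl, hv]; rfl
  · -- Marketing
    have n0 : pvScan tl 5 ≠ 0 := pvScan_ne tl 0 (by decide) (by
      intro kp hkp hkp2
      simp only [pvKeywords, List.mem_cons, List.not_mem_nil, or_false] at hkp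
      rcases hkp with rfl | rfl | rfl | rfl | rfl | rfl | rfl | rfl | rfl | rfl | rfl <;> simp_all)
    have n1 : pvScan tl 5 ≠ 1 := pvScan_ne tl 1 (by decide) (by
      intro kp hkp hkp2
      simp only [pvKeywords, List.mem_cons, List.not_mem_nil, or_false] at hkp
      rcases hkp with rfl | rfl | rfl | rfl | rfl | rfl | rfl | rfl | rfl | rfl | rfl <;> simp_all)
    have hub : pvScan tl 5 ≤ 2 := by
      rcases h3 with h | h
      · exact pvScan_le_of_occ tl "marketing".toList 2 (by decide) (by decide) h
      · exact pvScan_le_of_occ tl "content".toList 2 (by decide) (by decide) h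
    have hv : pvScan tl 5 = 2 := by omega
    rw [← htl, hv]; rfl
  · -- Human Resources
    have n0 : pvScan tl 5 ≠ 0 := pvScan_ne tl 0 (by decide) (by
      intro kp hkp hkp2
      simp only [pvKeywords, List.mem_cons, List.not_mem_nil, or_false] at hkp
      rcases hkp with rfl | rfl | rfl | rfl | rfl | rfl | rfl | rfl | rfl | rfl | rfl <;> simp_all)
    have n1 : pvScan tl 5 ≠ 1 := pvScan_ne tl 1 (by decide) (by
      intro kp hkp hkp2
      simp only [pvKeywords, List.mem_cons, List.not_mem_nil, or_false] at hkp
      rcases hkp with rfl | rfl | rfl | rfl | rfl | rfl | rfl | rfl | rfl | rfl | rfl <;> simp_all)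
    have n2 : pvScan tl 5 ≠ 2 := pvScan_ne tl 2 (by decide) (by
      intro kp hkp hkp2
      simp only [pvKeywords, List.mem_cons, List.not_mem_nil, or_false] at hkp
      rcases hkp with rfl | rfl | rfl | rfl | rfl | rfl | rfl | rfl | rfl | rfl | rfl <;> simp_all)
    have hub : pvScan tl 5 ≤ 3 := by
      rcases h4 with h | h
      · exact pvScan_le_of_occ tl "hr".toList 3 (by decide) (by decide) h
      · exact pvScan_le_of_occ tl "human".toList 3 (by decide) (by decide) h
    have hv : pvScan tl 5 = 3 := by omega
    rw [← htl, hv]; rfl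
  · -- Finance
    have n0 : pvScan tl 5 ≠ 0 := pvScan_ne tl 0 (by decide) (by
      intro kp hkp hkp2
      simp only [pvKeywords, List.mem_cons, List.not_mem_nil, or_false] at hkp
      rcases hkp with rfl | rfl | rfl | rfl | rfl | rfl | rfl | rfl | rfl | rfl | rfl <;> simp_all)
    have n1 : pvScan tl 5 ≠ 1 := pvScan_ne tl 1 (by decide) (by
      intro kp hkp hkp2
      simp only [pvKeywords, List.mem_cons, List.not_mem_nil, or_false] at hkp
      rcases hkp with rfl | rfl | rfl | rfl | rfl | rfl | rfl | rfl | rfl | rfl | rfl <;> simp_all)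
    have n2 : pvScan tl 5 ≠ 2 := pvScan_ne tl 2 (by decide) (by
      intro kp hkp hkp2
      simp only [pvKeywords, List.mem_cons, List.not_mem_nil, or_false] at hkp
      rcases hkp with rfl | rfl | rfl | rfl | rfl | rfl | rfl | rfl | rfl | rfl | rfl <;> simp_all)
    have n3 : pvScan tl 5 ≠ 3 := pvScan_ne tl 3 (by decide) (by
      intro kp hkp hkp2
      simp only [pvKeywords, List.mem_cons, List.not_mem_nil, or_false] at hkp
      rcases hkp with rfl | rfl | rfl | rfl | rfl | rfl | rfl | rfl | rfl | rfl | rfl <;> simp_all)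
    have hub : pvScan tl 5 ≤ 4 := by
      rcases h5 with h | h
      · exact pvScan_le_of_occ tl "finance".toList 4 (by decide) (by decide) h
      · exact pvScan_le_of_occ tl "accounting".toList 4 (by decide) (by decide) h
    have hv : pvScan tl 5 = 4 := by omega
    rw [← htl, hv]; rfl
  · -- Operations
    have n0 : pvScan tl 5 ≠ 0 := pvScan_ne tl 0 (by decide) (by
      intro kp hkp hkp2
      simp only [pvKeywords, List.mem_cons, List.not_mem_nil, or_false] at hkp
      rcases hkp with rfl | rfl | rfl | rfl | rfl | rfl | rfl | rfl | rfl | rfl | rfl <;> simp_all)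
    have n1 : pvScan tl 5 ≠ 1 := pvScan_ne tl 1 (by decide) (by
      intro kp hkp hkp2
      simp only [pvKeywords, List.mem_cons, List.not_mem_nil, or_false] at hkp
      rcases hkp with rfl | rfl | rfl | rfl | rfl | rfl | rfl | rfl | rfl | rfl | rfl <;> simp_all)
    have n2 : pvScan tl 5 ≠ 2 := pvScan_ne tl 2 (by decide) (by
      intro kp hkp hkp2
      simp only [pvKeywords, List.mem_cons, List.not_mem_nil, or_false] at hkp
      rcases hkp with rfl | rfl | rfl | rfl | rfl | rfl | rfl | rfl | rfl | rfl | rfl <;> simp_all)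
    have n3 : pvScan tl 5 ≠ 3 := pvScan_ne tl 3 (by decide) (by
      intro kp hkp hkp2
      simp only [pvKeywords, List.mem_cons, List.not_mem_nil, or_false] at hkp
      rcases hkp with rfl | rfl | rfl | rfl | rfl | rfl | rfl | rfl | rfl | rfl | rfl <;> simp_all)
    have n4 : pvScan tl 5 ≠ 4 := pvScan_ne tl 4 (by decide) (by
      intro kp hkp hkp2
      simp only [pvKeywords, List.mem_cons, List.not_mem_nil, or_false] at hkp
      rcases hkp with rfl | rfl | rfl | rfl | rfl | rfl | rfl | rfl | rfl | rfl | rfl <;> simp_all)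
    have hv : pvScan tl 5 = 5 := by omega
    rw [← htl, hv]; rfl
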